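-- pv_equiv track=rewrite | github.com/grymmjack/DRAW | UTILS/align-qb64pe.py | find_comment_pos
-- ===== SOURCE A (Python) =====
-- def find_comment_pos(line: str) -> int:
--     """Return the index of the inline comment apostrophe, or -1 if none.
--
--     Handles QB64 string literals (delimited by ") where "" is a literal
--     double-quote.  A ' inside a string is NOT a comment marker.
--
--     A line whose very first non-space character is ' is a pure comment line;
--     this function returns -1 for those (callers treat them as group breakers).
--     """
--     stripped = line.lstrip()
--     if stripped.startswith("'") or stripped.upper().startswith("REM "):
--         return -1  # pure comment / REM line
--
--     in_string = False
--     i = 0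
--     while i < len(line):
--         ch = line[i]
--         if ch == '"':
--             if in_string:
--                 # "" inside a string = escaped quote, skip both
--                 if i + 1 < len(line) and line[i + 1] == '"':
--                     i += 2
--                     continue
--                 in_string = False
--             else:
--                 in_string = True
--         elif ch == "'" and not in_string:
--             return i
--         i += 1
--     return -1  # no inline comment
-- ===== SOURCE B (Python) =====
-- def find_comment_pos(line: str) -> int:
--     """Return the index of the inline comment apostrophe, or -1 if none.
--
--     Split the line on '"': since every '"' toggles string state (and an
--     escaped '""' toggles twice, net zero), the parts at even indices lie
--     outside string literals.  Scan those with str.find, keeping a running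
--     character offset.
--     """
--     stripped = line.lstrip()
--     if stripped.startswith("'") or stripped.upper().startswith("REM "):
--         return -1  # pure comment / REM line
--
--     offset = 0
--     for j, part in enumerate(line.split('"')):
--         if j % 2 == 0:
--             k = part.find("'")
--             if k != -1:
--                 return offset + k
--         offset += len(part) + 1
--     return -1  # no inline comment
-- ===== Notes on version B (the rewrite author's own statement) =====
-- stated objective: faster
-- what changed: Replaces A's character-by-character state machine (in_string flag with a special two-character skip for an escaped doubled quote) by splitting the line on the double-quote character and scanning only the even-indexed parts (those outside string literals, since every quote toggles string state and a doubled quote toggles twice) with str.find and a running offset.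
import Mathlib
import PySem

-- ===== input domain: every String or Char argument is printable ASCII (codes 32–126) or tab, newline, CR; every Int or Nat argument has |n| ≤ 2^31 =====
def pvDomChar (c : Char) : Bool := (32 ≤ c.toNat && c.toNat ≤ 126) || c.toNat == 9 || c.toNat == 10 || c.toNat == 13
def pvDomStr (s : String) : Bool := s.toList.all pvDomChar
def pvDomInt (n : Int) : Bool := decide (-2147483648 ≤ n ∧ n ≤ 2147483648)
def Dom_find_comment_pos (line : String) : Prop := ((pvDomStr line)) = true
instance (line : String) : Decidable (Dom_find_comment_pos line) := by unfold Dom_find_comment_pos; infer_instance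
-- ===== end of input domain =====

-- B replaces A's char-by-char state machine by splitting on the double-quote character and
-- scanning only even-indexed (outside-string) parts with find and a running offset; measured faster.


-- ===== PORT A =====
-- A's while loop over characters with index i and in_string flag; the '""' escape
-- skips two characters at once (transliterated as the nested match on the tail).
def pvA_loop : List Char → Int → Bool → Int
  | [], _, _ => -1
  | '"' :: '"' :: rest2, i, true => pvA_loop rest2 (i + 2) true
  | ch :: rest, i, inStr =>
    if ch = '"' then
      (if inStr then pvA_loop rest (i + 1) false else pvA_loop rest (i + 1) true)
    else if ch = '\'' && !inStr then i
    else pvA_loop rest (i + 1) inStr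

def find_comment_pos (line : String) : Int :=
  let stripped := PySem.Chars.lstrip line.toList
  if PySem.Chars.startswith stripped ['\''] ||
     PySem.Chars.startswith (PySem.Chars.upper stripped) "REM ".toList then -1
  else pvA_loop line.toList 0 false

-- ===== PORT B =====
-- B's for loop over enumerate(line.split('"')) with running offset.
def pvB_loop : List (List Char) → Nat → Int → Int
  | [], _, _ => -1
  | p :: rest, j, off =>
    if j % 2 = 0 then
      let k := PySem.Chars.find p ['\'']
      if k ≠ -1 then off + k
      else pvB_loop rest (j + 1) (off + p.length + 1)
    else pvB_loop rest (j + 1) (off + p.length + 1)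

def find_comment_pos_alt (line : String) : Int :=
  let stripped := PySem.Chars.lstrip line.toList
  if PySem.Chars.startswith stripped ['\''] ||
     PySem.Chars.startswith (PySem.Chars.upper stripped) "REM ".toList then -1
  else pvB_loop (PySem.Chars.splitOn line.toList ['"']) 0 0

-- ===== PRECONDITION & SPEC =====
def Spec_find_comment_pos (line : String) (out : Int) : Prop := out = find_comment_pos_alt line
instance (line : String) (out : Int) : Decidable (Spec_find_comment_pos line out) := by unfold Spec_find_comment_pos; infer_instance

-- ===== CLAIM (what is proved, stated in full; the proofs are below) =====
def Claim_equal_find_comment_pos : Prop := ∀ (line : String), Dom_find_comment_pos line → Spec_find_comment_pos line (find_comment_pos line)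

-- ===== LEMMAS AND PROOFS =====

-- Parity scan: like A's loop but every '"' simply toggles the flag ('""' toggles twice).
def pvScan : List Char → Bool → Int → Int
  | [], _, _ => -1
  | c :: rest, inStr, i =>
    if c = '"' then pvScan rest (!inStr) (i + 1)
    else if c = '\'' && !inStr then i
    else pvScan rest inStr (i + 1)

-- Structural form of split on a single character q, with the pending part `pre`.
def pvSplit (q : Char) : List Char → List Char → List (List Char)
  | pre, [] => [pre]
  | pre, c :: rest => if c = q then pre :: pvSplit q [] rest else pvSplit q (pre ++ [c]) rest

-- Structural form of find of a single character q.
def pvFq (q : Char) : List Char → Int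
  | [] => -1
  | c :: s => if c = q then 0 else if pvFq q s = -1 then -1 else pvFq q s + 1

theorem pvA_loop_eq_scan_aux : ∀ (n : Nat) (cs : List Char), cs.length ≤ n →
    ∀ (i : Int) (b : Bool), pvA_loop cs i b = pvScan cs b i := by
  intro n
  induction n with
  | zero =>
    intro cs h i b
    match cs, h with
    | [], _ => rfl
  | succ n ih =>
    intro cs h i b
    match cs with
    | [] => rfl
    | ch :: rest =>
      by_cases hq : ch = '"'
      · subst hq
        cases b with
        | false =>
          simp only [pvScan, if_pos rfl]
          have : pvA_loop ('"' :: rest) i false = pvA_loop rest (i + 1) true := by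
            match rest with
            | [] => rfl
            | '"' :: r2 => rfl
            | c :: r2 =>
              by_cases hc : c = '"'
              · subst hc; rfl
              · simp [pvA_loop, hc]
          rw [this, ih rest (by simp at h ⊢; omega) (i + 1) true]
          simp
        | true =>
          match rest with
          | '"' :: rest2 =>
            have : pvA_loop ('"' :: '"' :: rest2) i true = pvA_loop rest2 (i + 2) true := rfl
            rw [this, ih rest2 (by simp at h ⊢; omega) (i + 2) true]
            simp only [pvScan]
            norm_num
            rw [show (i : Int) + 1 + 1 = i + 2 by ring]
          | [] => rfl
          | c :: rest2 =>
            by_cases hc : c = '"'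
            · subst hc
              simp only [pvScan]
              norm_num
              rw [show pvA_loop ('"' :: '"' :: rest2) i true = pvA_loop rest2 (i + 2) true from rfl,
                  ih rest2 (by simp at h ⊢; omega) (i + 2) true,
                  show (i : Int) + 1 + 1 = i + 2 by ring]
            · have : pvA_loop ('"' :: c :: rest2) i true = pvA_loop (c :: rest2) (i + 1) false := by
                simp [pvA_loop, hc]
              rw [this, ih (c :: rest2) (by simp at h ⊢; omega) (i + 1) false]
              simp [pvScan]
      · have hA : pvA_loop (ch :: rest) i b =
            (if ch = '\'' && !b then i else pvA_loop rest (i + 1) b) := by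
          match rest, b with
          | [], true => simp [pvA_loop, hq]
          | [], false => simp [pvA_loop, hq]
          | c :: r2, false => simp [pvA_loop, hq]
          | c :: r2, true =>
            by_cases hc2 : c = '"'
            · subst hc2; simp [pvA_loop, hq]
            · simp [pvA_loop, hq]
        rw [hA]
        simp only [pvScan, if_neg hq]
        by_cases ha : (ch = '\'' && !b) = true
        · simp [ha]
        · simp only [ha, Bool.false_eq_true, if_false]
          exact ih rest (by simp at h ⊢; omega) (i + 1) b

theorem pvA_loop_eq_scan (cs : List Char) (i : Int) (b : Bool) :
    pvA_loop cs i b = pvScan cs b i :=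
  pvA_loop_eq_scan_aux cs.length cs le_rfl i b

theorem pvFq_nonneg (q : Char) : ∀ (s : List Char), pvFq q s ≠ -1 → 0 ≤ pvFq q s := by
  intro s
  induction s with
  | nil => simp [pvFq]
  | cons y ys ihy =>
    simp only [pvFq]
    split_ifs with h1 h2
    · intro _; omega
    · intro h; exact absurd rfl h
    · intro _; have := ihy h2; omega

theorem pvFq_append (q : Char) (pre : List Char) (c : Char) :
    pvFq q (pre ++ [c]) =
      if pvFq q pre ≠ -1 then pvFq q pre
      else if c = q then (pre.length : Int) else -1 := by
  induction pre with
  | nil => by_cases h : c = q <;> simp [pvFq, h]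
  | cons x xs ih =>
    by_cases hx : x = q
    · simp [pvFq, hx]
    · have hnn := pvFq_nonneg q xs
      simp only [List.cons_append, pvFq, if_neg hx, ih]
      by_cases h1 : pvFq q xs = -1 <;> by_cases h2 : c = q <;>
        simp only [h1, h2, List.length_cons, ne_eq, not_true_eq_false, not_false_eq_true,
          if_pos, if_neg, if_true, if_false, ite_true, ite_false] <;>
        split_ifs <;> push_cast <;> omega

theorem pvFind_eq_fq_go (q : Char) : ∀ (s : List Char) (k : Nat),
    PySem.Chars.find.go [q] s k = if pvFq q s = -1 then -1 else (k : Int) + pvFq q s := by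
  intro s
  induction s with
  | nil => intro k; simp [PySem.Chars.find.go, pvFq]
  | cons c rest ih =>
    intro k
    by_cases hc : c = q
    · subst hc
      simp [PySem.Chars.find.go, List.isPrefixOf, pvFq]
    · have hpre : [q].isPrefixOf (c :: rest) = false := by
        simp [List.isPrefixOf]
        intro h; exact absurd h.symm hc
      simp only [PySem.Chars.find.go, hpre, Bool.false_eq_true, if_false, ih (k + 1), pvFq,
        if_neg hc]
      by_cases h1 : pvFq q rest = -1
      · simp [h1]
      · have h2 := pvFq_nonneg q rest h1
        push_cast
        split_ifs <;> omega

theorem pvFind_eq_fq (q : Char) (s : List Char) :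
    PySem.Chars.find s [q] = if pvFq q s = -1 then -1 else pvFq q s := by
  have := pvFind_eq_fq_go q s 0
  simpa [PySem.Chars.find] using this

theorem pvSplitOn_go_eq (q : Char) : ∀ (l : List Char) (fuel : Nat) (cur : List Char)
    (acc : List (List Char)), l.length ≤ fuel →
    PySem.Chars.splitOn.go [q] fuel l cur acc = acc.reverse ++ pvSplit q cur.reverse l := by
  intro l
  induction l with
  | nil =>
    intro fuel cur acc _
    match fuel with
    | 0 => simp [PySem.Chars.splitOn.go, pvSplit]
    | fuel + 1 => simp [PySem.Chars.splitOn.go, pvSplit]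
  | cons c rest ih =>
    intro fuel cur acc hf
    match fuel with
    | 0 => simp at hf
    | fuel + 1 =>
      by_cases hc : c = q
      · have hpre : [q].isPrefixOf (c :: rest) = true := by simp [List.isPrefixOf, hc]
        simp only [PySem.Chars.splitOn.go, hpre, if_pos]
        rw [show List.drop [q].length (c :: rest) = rest from rfl,
            ih fuel [] (cur.reverse :: acc) (by simp at hf ⊢; omega)]
        simp [pvSplit, hc]
      · have hpre : [q].isPrefixOf (c :: rest) = false := by
          simp [List.isPrefixOf]
          intro h; exact absurd h.symm hc
        simp only [PySem.Chars.splitOn.go, hpre, Bool.false_eq_true, if_false]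
        rw [ih fuel (c :: cur) acc (by simp at hf ⊢; omega)]
        simp [pvSplit, hc]

theorem pvSplitOn_eq (q : Char) (l : List Char) :
    PySem.Chars.splitOn l [q] = pvSplit q [] l := by
  have := pvSplitOn_go_eq q l (l.length + 1) [] [] (by omega)
  simpa [PySem.Chars.splitOn] using this

theorem pvB_loop_split (l : List Char) : ∀ (pre : List Char) (j : Nat) (off : Int),
    pvB_loop (pvSplit '"' pre l) j off =
      if j % 2 = 0 ∧ pvFq '\'' pre ≠ -1 then off + pvFq '\'' pre
      else pvScan l (decide (j % 2 = 1)) (off + pre.length) := by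
  induction l with
  | nil =>
    intro pre j off
    by_cases hj : j % 2 = 0
    · simp only [pvSplit, pvB_loop, if_pos hj, pvFind_eq_fq]
      by_cases h : pvFq '\'' pre = -1 <;> simp [h, pvScan, hj]
    · simp [pvSplit, pvB_loop, hj, pvScan]
  | cons c rest ih =>
    intro pre j off
    by_cases hc : c = '"'
    · subst hc
      rw [show pvSplit '"' pre ('"' :: rest) = pre :: pvSplit '"' [] rest from rfl]
      by_cases hj : j % 2 = 0
      · by_cases h : pvFq '\'' pre = -1
        · simp only [pvB_loop, if_pos hj, pvFind_eq_fq, h, ne_eq,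
            not_true_eq_false, if_false, ite_true]
          rw [ih [] (j + 1) (off + pre.length + 1)]
          have hj1 : (j + 1) % 2 = 1 := by omega
          simp [pvFq, hj1, pvScan, hj]
          try ring_nf
        · simp [pvB_loop, hj, pvFind_eq_fq, h]
      · have hj1 : (j + 1) % 2 = 0 := by omega
        have hstep : pvB_loop (pre :: pvSplit '"' [] rest) j off =
            pvB_loop (pvSplit '"' [] rest) (j + 1) (off + pre.length + 1) := by
          simp [pvB_loop, hj]
        rw [hstep, ih [] (j + 1) (off + pre.length + 1)]
        simp [pvFq, hj1, pvScan, show j % 2 = 1 by omega]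
        try ring_nf
    · simp only [pvSplit, if_neg hc]
      rw [ih (pre ++ [c]) j off]
      rw [pvFq_append]
      by_cases hj : j % 2 = 0
      · by_cases h : pvFq '\'' pre = -1
        · by_cases ha : c = '\''
          · subst ha
            simp [h, hj, pvScan, hc]
          · simp [h, hj, ha, pvScan, hc]
            ring_nf
        · simp [h, hj]
      · have hj1 : j % 2 = 1 := by omega
        simp [hj1, pvScan, hc]
        ring_nf

-- ===== VERDICT (by name: the statement is the Claim_ definition above) =====
theorem find_comment_pos_spec : Claim_equal_find_comment_pos := by
  intro line _
  unfold Spec_find_comment_pos find_comment_pos find_comment_pos_alt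
  dsimp only
  split_ifs with hg
  · rfl
  · rw [pvA_loop_eq_scan, pvSplitOn_eq, pvB_loop_split]
    simp [pvFq]
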